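-- pv_equiv track=rewrite | github.com/a2215489149/PetAI_KG | core/line_bot.py | _trim_context
-- ===== SOURCE A (Python) =====
-- CONTEXT_MAX_MESSAGES = 20  # Only keep the latest 20 messages in conversation history
--
-- def _trim_context(context: str, max_messages: int = CONTEXT_MAX_MESSAGES) -> str:
--     """Trim conversation context to keep only the most recent N messages.
--     Each 'User:' or 'AI:' line counts as one message.
--     Image observations (stored on a separate Redis key) are not affected.
--     """
--     lines = context.strip().split("\n")
--     # Identify message lines (start with 'User:' or 'AI:')
--     message_indices = [i for i, line in enumerate(lines) if line.startswith("User:") or line.startswith("AI:")]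
--
--     if len(message_indices) <= max_messages:
--         return context
--
--     # Keep only the last N message lines
--     cutoff_index = message_indices[-max_messages]
--     trimmed = "\n".join(lines[cutoff_index:])
--     return trimmed
-- ===== SOURCE B (Python) =====
-- CONTEXT_MAX_MESSAGES = 20
--
-- def _trim_context(context: str, max_messages: int = CONTEXT_MAX_MESSAGES) -> str:
--     """Trim by a single reverse scan: count message lines from the end and
--     remember the index of the max_messages-th one; as soon as one more message
--     line is found before it, trim there."""
--     lines = context.strip().split("\n")
--     seen = 0
--     keep_from = 0
--     for i in range(len(lines) - 1, -1, -1):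
--         line = lines[i]
--         if line.startswith("User:") or line.startswith("AI:"):
--             seen += 1
--             if seen == max_messages:
--                 keep_from = i
--             elif seen > max_messages:
--                 return "\n".join(lines[keep_from:])
--     return context
-- ===== Notes on version B (the rewrite author's own statement) =====
-- stated objective: alternative
-- what changed: A builds the full forward list of message-line indices and indexes it from the end; B does a single reverse scan over the lines with a counter, remembering the index of the max_messages-th message from the end and trimming as soon as one earlier message line is found.
-- outside the precondition, e.g. on _trim_context('x\nUser: a\nUser: b', 0): A returns 'User: a\nUser: b', B returns 'x\nUser: a\nUser: b'; on _trim_context('User: a', -2): A raises IndexError, B returns 'User: a'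
import Mathlib
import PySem

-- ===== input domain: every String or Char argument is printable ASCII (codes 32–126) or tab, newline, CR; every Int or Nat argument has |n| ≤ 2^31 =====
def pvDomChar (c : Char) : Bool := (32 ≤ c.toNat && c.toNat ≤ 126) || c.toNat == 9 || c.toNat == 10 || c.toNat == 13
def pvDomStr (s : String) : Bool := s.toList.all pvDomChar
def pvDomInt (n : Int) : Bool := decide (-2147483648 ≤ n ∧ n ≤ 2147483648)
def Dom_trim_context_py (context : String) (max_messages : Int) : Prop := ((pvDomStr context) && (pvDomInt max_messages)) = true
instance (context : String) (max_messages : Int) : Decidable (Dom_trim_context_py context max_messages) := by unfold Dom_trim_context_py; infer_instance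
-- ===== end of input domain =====

-- B replaces A's forward index-list construction by a single reverse scan with a counter
-- (objective: alternative decomposition; same asymptotic cost).

-- ===== PORT A =====
def trim_context_py (context : String) (max_messages : Int) : String :=
  let lines := (PySem.Str.split? (PySem.Str.strip context) "\n").getD []
  let message_indices :=
    ((PySem.List.enumerate lines 0).filter
      (fun p => PySem.Str.startswith p.2 "User:" || PySem.Str.startswith p.2 "AI:")).map (·.1)
  if (message_indices.length : Int) ≤ max_messages then context
  else
    match PySem.List.pyGet? message_indices (-max_messages) with
    | some cutoff => PySem.Str.join "\n" (PySem.List.slice lines (some cutoff) none)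
    | none => ""   -- IndexError in Python; excluded by Pre_

-- ===== PORT B =====
-- the reverse 'for i in range(len(lines)-1, -1, -1)' loop of Source B, with its early return
def pvBLoop (rev : List (Int × String)) (max_messages : Int) (seen : Int) (keep_from : Int) : Option Int :=
  match rev with
  | [] => none
  | (i, line) :: rest =>
    if PySem.Str.startswith line "User:" || PySem.Str.startswith line "AI:" then
      if seen + 1 == max_messages then pvBLoop rest max_messages (seen + 1) i
      else if seen + 1 > max_messages then some keep_from
      else pvBLoop rest max_messages (seen + 1) keep_from
    else pvBLoop rest max_messages seen keep_from

def trim_context_py_alt (context : String) (max_messages : Int) : String :=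
  let lines := (PySem.Str.split? (PySem.Str.strip context) "\n").getD []
  match pvBLoop ((PySem.List.enumerate lines 0).reverse) max_messages 0 0 with
  | some keep_from => PySem.Str.join "\n" (PySem.List.slice lines (some keep_from) none)
  | none => context

-- ===== PRECONDITION & SPEC =====
-- Pre_ excludes max_messages ≤ 0, the inputs outside the function's natural domain of positive
-- message counts: there A either raises IndexError (negative max_messages with few message lines)
-- or, for max_messages = 0, returns an accidental value cut at the FIRST message line instead of
-- trimming; B's reverse scan naturally behaves differently there.
def Pre_trim_context_py (context : String) (max_messages : Int) : Prop := 1 ≤ max_messages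
instance (context : String) (max_messages : Int) : Decidable (Pre_trim_context_py context max_messages) := by unfold Pre_trim_context_py; infer_instance
def pvWitness_trim_context_py : String × Int := ("User: a\nAI: b\nUser: c", 2)

def Spec_trim_context_py (context : String) (max_messages : Int) (out : String) : Prop := out = trim_context_py_alt context max_messages
instance (context : String) (max_messages : Int) (out : String) : Decidable (Spec_trim_context_py context max_messages out) := by unfold Spec_trim_context_py; infer_instance

-- ===== CLAIM (what is proved, stated in full; the proofs are below) =====
def Claim_equal_trim_context_py : Prop := ∀ (context : String) (max_messages : Int), Dom_trim_context_py context max_messages → Pre_trim_context_py context max_messages → Spec_trim_context_py context max_messages (trim_context_py context max_messages)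

-- ===== LEMMAS AND PROOFS =====

-- the message-line test, shared by both ports
def pvIsMsg (p : Int × String) : Bool :=
  PySem.Str.startswith p.2 "User:" || PySem.Str.startswith p.2 "AI:"

-- pvBLoop ignores non-message lines: it equals itself on the filtered list
theorem pvBLoop_filter (l : List (Int × String)) (m s k : Int) :
    pvBLoop l m s k = pvBLoop (l.filter pvIsMsg) m s k := by
  induction l generalizing s k with
  | nil => rfl
  | cons p rest ih =>
    obtain ⟨i, line⟩ := p
    by_cases h : pvIsMsg (i, line)
    · rw [List.filter_cons_of_pos h]
      simp only [pvIsMsg] at h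
      simp only [pvBLoop, h, if_true]
      split_ifs <;> first | rfl | exact ih _ _
    · rw [List.filter_cons_of_neg h]
      simp only [pvIsMsg] at h
      simp only [pvBLoop, h, Bool.false_eq_true, if_false]
      exact ih _ _

-- on a list of message lines, with the counter already at m, the next element triggers the return
theorem pvBLoop_at_max (l : List (Int × String)) (m k : Int)
    (hl : ∀ p ∈ l, pvIsMsg p = true) :
    pvBLoop l m m k = if l = [] then none else some k := by
  cases l with
  | nil => rfl
  | cons p rest =>
    obtain ⟨i, line⟩ := p
    have hp := hl (i, line) (by simp)
    simp only [pvIsMsg] at hp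
    simp only [pvBLoop, hp, if_true]
    have h1 : (m + 1 == m) = false := by simp
    have h2 : m + 1 > m := by omega
    simp [h1, h2]

-- characterisation of the reverse loop on a list of message lines, counter below m
theorem pvBLoop_char (l : List (Int × String)) (m s k : Int)
    (hl : ∀ p ∈ l, pvIsMsg p = true) (hs : s < m) :
    pvBLoop l m s k =
      (match l.drop (m - s - 1).toNat with
       | a :: _ :: _ => some a.1
       | _ => none) := by
  induction l generalizing s k with
  | nil => simp [pvBLoop]
  | cons p rest ih =>
    obtain ⟨i, line⟩ := p
    have hp := hl (i, line) (by simp)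
    have hrest : ∀ q ∈ rest, pvIsMsg q = true := fun q hq => hl q (by simp [hq])
    simp only [pvIsMsg] at hp
    simp only [pvBLoop, hp, if_true]
    by_cases h1 : s + 1 = m
    · have hb : (s + 1 == m) = true := by simp [h1]
      have ht : (m - s - 1).toNat = 0 := by omega
      rw [if_pos hb, h1, pvBLoop_at_max rest m i hrest, ht]
      cases rest <;> simp
    · have hb : (s + 1 == m) = false := by simp [h1]
      have h2 : ¬ (s + 1 > m) := by omega
      rw [if_neg (by simp [hb]), if_neg (by simpa using h2)]
      rw [ih (s + 1) k hrest (by omega)]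
      have ht : (m - s - 1).toNat = (m - (s + 1) - 1).toNat + 1 := by omega
      rw [ht, List.drop_succ_cons]

theorem trim_context_py_spec : Claim_equal_trim_context_py := by
  intro context m _ hpre
  have hm : 1 ≤ m := hpre
  unfold Spec_trim_context_py
  simp only [trim_context_py, trim_context_py_alt]
  generalize (PySem.Str.split? (PySem.Str.strip context) "\n").getD [] = lines
  have hP : (fun p : Int × String => PySem.Str.startswith p.2 "User:" || PySem.Str.startswith p.2 "AI:") = pvIsMsg := rfl
  rw [hP]
  have hloop : pvBLoop ((PySem.List.enumerate lines 0).reverse) m 0 0 =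
      (match ((PySem.List.enumerate lines 0).filter pvIsMsg).reverse.drop (m - 1).toNat with
       | a :: _ :: _ => some a.1
       | _ => none) := by
    rw [pvBLoop_filter, List.filter_reverse,
        pvBLoop_char _ m 0 0 (fun p hp => List.of_mem_filter (List.mem_reverse.mp hp)) (by omega)]
    norm_num
  rw [hloop]
  generalize (PySem.List.enumerate lines 0).filter pvIsMsg = F
  by_cases hn : (F.length : Int) ≤ m
  · -- no trimming: both return context
    rw [if_pos (by simpa using hn)]
    have hlen : (F.reverse.drop (m - 1).toNat).length ≤ 1 := by
      rw [List.length_drop, List.length_reverse]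
      omega
    rcases hD : F.reverse.drop (m - 1).toNat with _ | ⟨a, _ | ⟨b, t⟩⟩
    · rfl
    · rfl
    · rw [hD] at hlen
      simp only [List.length_cons] at hlen
      omega
  · -- trimming: both cut at the same index
    rw [if_neg (by simpa using hn)]
    obtain ⟨mn, hmc⟩ : ∃ k : Nat, m = (k : Int) := ⟨m.toNat, by omega⟩
    have hcnt : mn < F.length := by omega
    have hpos : 0 < mn := by omega
    have hdrop : (m - 1).toNat = mn - 1 := by omega
    have h1 : mn - 1 < F.reverse.length := by simp; omega
    -- the head of the drop on the B side
    have hcons : F.reverse.drop (mn - 1) = F.reverse[mn - 1] :: F.reverse.drop (mn - 1 + 1) :=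
      List.drop_eq_getElem_cons h1
    have h2 : mn - 1 + 1 < F.reverse.length := by simp; omega
    have hcons2 : F.reverse.drop (mn - 1 + 1) = F.reverse[mn - 1 + 1] :: F.reverse.drop (mn - 1 + 1 + 1) :=
      List.drop_eq_getElem_cons h2
    rw [hdrop, hcons, hcons2]
    -- the A side: message_indices[-m]
    have hA : PySem.List.pyGet? (F.map (·.1)) (-m) = (F.map (·.1))[F.length - mn]? := by
      rw [hmc, PySem.List.pyGet?_neg_natCast (F.map (·.1)) mn hpos (by simp; omega)]
      simp
    rw [hA, List.getElem?_map, List.getElem?_eq_getElem (by omega)]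
    have hidx : F.length - 1 - (mn - 1) = F.length - mn := by omega
    simp [List.getElem_reverse, hidx]
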